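-- pv_equiv track=rewrite | github.com/seonsangji/sesac | 4.Python/2.ifandfor/5.eg2.py | find_user3
-- ===== SOURCE A (Python) =====
-- users = [
--     {"name":"Alice","age":"25","location":"Seoul","car":"BMW"},
--     {"name":"Bob","age":"30","location":"Busan","car":"Mercedes"},
--     {"name":"Bob","age":"40","location":"Jeju","car":"Mercedes"},
--     {"name":"Charlie","age":"35","location":"Daegu","car":"Audi"},
-- ]
--
-- def find_user3(name=None,age=None):
--     result = []
--
--     for u in users:
--         if name:
--             if u["name"] == name:
--                 if age:
--                     if u["age"]==age:
--                         result.append(u)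
--                 else:
--                     result.append(u)
--         elif age:
--             if u["age"]==age:
--                 result.append(u)
--
--
--         else:
--             result.append(u)
--
--     return result
-- ===== SOURCE B (Python) =====
-- users = [
--     {"name":"Alice","age":"25","location":"Seoul","car":"BMW"},
--     {"name":"Bob","age":"30","location":"Busan","car":"Mercedes"},
--     {"name":"Bob","age":"40","location":"Jeju","car":"Mercedes"},
--     {"name":"Charlie","age":"35","location":"Daegu","car":"Audi"},
-- ]
--
-- def find_user3(name=None, age=None):
--     checks = []
--     if name:
--         checks.append(("name", name))
--     if age:
--         checks.append(("age", age))
--     return [u for u in users if all(u[k] == v for k, v in checks)]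
-- ===== Notes on version B (the rewrite author's own statement) =====
-- stated objective: simpler
-- what changed: Replaced the per-element nested name/age branch tree by first building a list of (key, expected) criteria from the truthy arguments and then one filter that checks all criteria with all().
import Mathlib
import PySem

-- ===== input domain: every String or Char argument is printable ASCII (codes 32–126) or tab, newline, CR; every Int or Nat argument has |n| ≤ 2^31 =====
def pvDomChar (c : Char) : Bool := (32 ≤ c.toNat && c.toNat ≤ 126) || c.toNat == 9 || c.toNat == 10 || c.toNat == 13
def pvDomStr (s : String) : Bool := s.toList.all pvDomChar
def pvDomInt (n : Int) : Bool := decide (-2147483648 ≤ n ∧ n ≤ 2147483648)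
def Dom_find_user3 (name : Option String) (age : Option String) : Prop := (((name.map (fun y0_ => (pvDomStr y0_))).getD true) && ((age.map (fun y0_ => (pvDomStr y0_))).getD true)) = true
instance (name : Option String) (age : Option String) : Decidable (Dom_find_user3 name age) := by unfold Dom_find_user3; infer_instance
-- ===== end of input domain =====

-- B replaces A's per-element nested branch tree by building a criteria list once and doing one all()-based filter; objective: simpler.

-- shared module-level constant `users`
def pvUsers : List (List (String × String)) :=
  [[("name","Alice"),("age","25"),("location","Seoul"),("car","BMW")],
   [("name","Bob"),("age","30"),("location","Busan"),("car","Mercedes")],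
   [("name","Bob"),("age","40"),("location","Jeju"),("car","Mercedes")],
   [("name","Charlie"),("age","35"),("location","Daegu"),("car","Audi")]]

-- ===== PORT A =====
-- Python truthiness of an optional string: None and "" are falsy
def pvTruthy (o : Option String) : Bool :=
  match o with
  | none => false
  | some s => s ≠ ""

-- u[k] for the fixed users: each dict literally has every key, so get? always hits; exact here
def pvGetKey (u : List (String × String)) (k : String) : String :=
  ((PySem.Dict.mk u).get? k).getD ""

def find_user3 (name : Option String) (age : Option String) : List (List (String × String)) :=
  pvUsers.foldl (fun result u =>
    if pvTruthy name then
      if some (pvGetKey u "name") == name then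
        if pvTruthy age then
          if some (pvGetKey u "age") == age then result ++ [u] else result
        else result ++ [u]
      else result
    else if pvTruthy age then
      if some (pvGetKey u "age") == age then result ++ [u] else result
    else result ++ [u]) []

-- ===== PORT B =====
-- u[k] under B's filter predicate (every fixed user dict has both keys, so exact)
def pvField (u : List (String × String)) (k : String) : String :=
  ((PySem.Dict.mk u).get? k).getD ""

-- 'checks = []; if name: checks.append(("name",name)); if age: checks.append(("age",age))'
def pvChecks (name : Option String) (age : Option String) : List (String × String) :=
  let c1 : List (String × String) :=
    match name with
    | some s => if s = "" then [] else [("name", s)]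
    | none => []
  match age with
  | some s => if s = "" then c1 else c1 ++ [("age", s)]
  | none => c1

def find_user3_alt (name : Option String) (age : Option String) : List (List (String × String)) :=
  pvUsers.filter (fun u => (pvChecks name age).all (fun kv => pvField u kv.1 == kv.2))

-- ===== PRECONDITION & SPEC =====
def Spec_find_user3 (name : Option String) (age : Option String) (out : List (List (String × String))) : Prop := out = find_user3_alt name age
instance (name : Option String) (age : Option String) (out : List (List (String × String))) : Decidable (Spec_find_user3 name age out) := by unfold Spec_find_user3; infer_instance

-- ===== CLAIM =====
def Claim_equal_find_user3 : Prop := ∀ (name : Option String) (age : Option String), Dom_find_user3 name age → Spec_find_user3 name age (find_user3 name age)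

-- ===== LEMMAS AND PROOFS =====

-- A's fold over any user list equals B's criteria filter, by induction on the list
lemma find_user3_fold_eq (name age : Option String) (us acc : List (List (String × String))) :
    us.foldl (fun result u =>
      if pvTruthy name then
        if some (pvGetKey u "name") == name then
          if pvTruthy age then
            if some (pvGetKey u "age") == age then result ++ [u] else result
          else result ++ [u]
        else result
      else if pvTruthy age then
        if some (pvGetKey u "age") == age then result ++ [u] else result
      else result ++ [u]) acc
    = acc ++ us.filter (fun u => (pvChecks name age).all (fun kv => pvField u kv.1 == kv.2)) := by
  induction us generalizing acc with
  | nil => simp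
  | cons u us ih =>
    simp only [List.foldl_cons, ih, List.filter_cons]
    have hpred : ∀ v : List (String × String),
        ((pvChecks name age).all (fun kv => pvField v kv.1 == kv.2))
        = (if pvTruthy name then
             if some (pvGetKey v "name") == name then
               if pvTruthy age then (some (pvGetKey v "age") == age) else true
             else false
           else if pvTruthy age then (some (pvGetKey v "age") == age) else true) := by
      intro v
      cases name with
      | none => cases age with
        | none => simp [pvChecks, pvTruthy]
        | some a =>
          by_cases ha : a = "" <;>
            simp [pvChecks, pvTruthy, ha, pvField, pvGetKey]
      | some n =>
        by_cases hn : n = ""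
        · cases age with
          | none => simp [pvChecks, pvTruthy, hn]
          | some a =>
            by_cases ha : a = "" <;>
              simp [pvChecks, pvTruthy, hn, ha, pvField, pvGetKey]
        · cases age with
          | none =>
            simp only [pvChecks, pvTruthy, hn, pvField, pvGetKey, List.all_cons, List.all_nil,
              Bool.and_true, if_neg hn]
            by_cases h2 : ((PySem.Dict.mk v).get? "name").getD "" = n <;> simp [h2, hn, beq_iff_eq, PySem.Dict.mk]
          | some a =>
            by_cases ha : a = "" <;>
              simp [pvChecks, pvTruthy, hn, ha, pvField, pvGetKey] <;>
              by_cases h2 : ((PySem.Dict.mk v).get? "name").getD "" = n <;> simp [h2]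
    rw [hpred u]
    split_ifs <;> simp_all

-- ===== VERDICT =====
theorem find_user3_spec : Claim_equal_find_user3 := by
  intro name age _
  unfold Spec_find_user3 find_user3 find_user3_alt
  simpa using find_user3_fold_eq name age pvUsers []
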